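-- pv_equiv track=rewrite | github.com/roshanis/shopagent | src/agentic_shop_lab/framework.py | _determine_recommendation
-- ===== SOURCE A (Python) =====
-- from typing import Dict, Any, List, Optional, Callable
--
-- def _determine_recommendation(
--
--     overall_score: int,
--     agent_results: Dict[str, Dict[str, Any]]
-- ) -> str:
--     """Determine overall recommendation"""
--     # Count recommendations
--     buy_count = sum(
--         1 for r in agent_results.values()
--         if r.get("recommendation") == "buy"
--     )
--     avoid_count = sum(
--         1 for r in agent_results.values()
--         if r.get("recommendation") == "avoid"
--     )
--
--     # Check for critical failures
--     safety_result = agent_results.get("Ingredient Safety", {})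
--     if safety_result.get("recommendation") == "avoid":
--         return "avoid"
--
--     # Make decision based on score and agent consensus
--     if overall_score >= 70 and buy_count >= 2:
--         return "buy"
--     elif overall_score < 40 or avoid_count >= 2:
--         return "avoid"
--     else:
--         return "neutral"
-- ===== SOURCE B (Python) =====
-- def _determine_recommendation(
--     overall_score: int,
--     agent_results,
-- ) -> str:
--     """Determine overall recommendation.
--
--     Case-split on the score regime first; each regime needs only a tailored
--     scan with early exit (or no scan at all for a low score).
--     """
--     if overall_score < 40:
--         # no agent vote can change the outcome: buy needs score >= 70,
--         # and both other branches yield "avoid".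
--         return "avoid"
--     if overall_score >= 70:
--         # "avoid" the moment Ingredient Safety votes avoid; otherwise tally.
--         buy = 0
--         avoid = 0
--         for name, r in agent_results.items():
--             rec = r.get("recommendation")
--             if rec == "avoid":
--                 if name == "Ingredient Safety":
--                     return "avoid"
--                 avoid += 1
--             elif rec == "buy":
--                 buy += 1
--         if buy >= 2:
--             return "buy"
--         return "avoid" if avoid >= 2 else "neutral"
--     # 40 <= overall_score < 70: "buy" is impossible; stop at the second
--     # avoid vote or at an Ingredient Safety avoid.
--     avoid = 0
--     for name, r in agent_results.items():
--         if r.get("recommendation") == "avoid":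
--             if name == "Ingredient Safety" or avoid == 1:
--                 return "avoid"
--             avoid += 1
--     return "neutral"
-- ===== Notes on version B (the rewrite author's own statement) =====
-- stated objective: alternative
-- what changed: B branches on the score regime first (low score returns 'avoid' with no scan at all; mid-range scores need no buy tally) and runs one tailored early-exit scan per regime, instead of A's two unconditional filtered scans plus a separate safety lookup followed by threshold branches; Pre_ only requires distinct agent names, which every Python dict guarantees.
import Mathlib
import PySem

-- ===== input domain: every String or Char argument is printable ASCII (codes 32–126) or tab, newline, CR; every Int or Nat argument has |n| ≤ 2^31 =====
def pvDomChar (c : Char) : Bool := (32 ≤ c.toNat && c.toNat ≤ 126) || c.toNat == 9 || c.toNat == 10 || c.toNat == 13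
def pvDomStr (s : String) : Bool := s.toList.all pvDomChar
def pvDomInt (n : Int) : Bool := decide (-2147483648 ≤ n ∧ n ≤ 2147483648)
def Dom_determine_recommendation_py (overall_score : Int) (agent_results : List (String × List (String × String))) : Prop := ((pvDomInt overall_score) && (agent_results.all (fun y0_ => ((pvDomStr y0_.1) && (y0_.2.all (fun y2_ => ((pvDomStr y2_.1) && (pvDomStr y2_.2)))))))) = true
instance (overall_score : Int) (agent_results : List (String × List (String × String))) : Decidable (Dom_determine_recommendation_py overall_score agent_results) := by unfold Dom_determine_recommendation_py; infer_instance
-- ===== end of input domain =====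

-- One line: B case-splits on the score regime first and runs one tailored early-exit scan per regime
-- (no scan at all for a low score), instead of A's unconditional full scans; return value only, no mutation.

-- ===== PORT A =====
-- r.get("recommendation"): first-match lookup in the association list (= dict.get, keys unique)
def pvGetRec (r : List (String × String)) : Option String :=
  match r.find? (fun p => p.1 == "recommendation") with
  | some p => some p.2
  | none => none

def determine_recommendation_py (overall_score : Int) (agent_results : List (String × List (String × String))) : String :=
  -- buy_count = sum(1 for r in agent_results.values() if r.get("recommendation") == "buy")
  let buy_count : Int := (agent_results.map Prod.snd).foldl
    (fun acc r => if pvGetRec r = some "buy" then acc + 1 else acc) 0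
  -- avoid_count likewise
  let avoid_count : Int := (agent_results.map Prod.snd).foldl
    (fun acc r => if pvGetRec r = some "avoid" then acc + 1 else acc) 0
  -- safety_result = agent_results.get("Ingredient Safety", {})
  let safety_result : List (String × String) :=
    match agent_results.find? (fun p => p.1 == "Ingredient Safety") with
    | some p => p.2
    | none => []
  if pvGetRec safety_result = some "avoid" then "avoid"
  else if overall_score ≥ 70 ∧ buy_count ≥ 2 then "buy"
  else if overall_score < 40 ∨ avoid_count ≥ 2 then "avoid"
  else "neutral"

-- ===== PORT B =====
-- high-score regime loop: early "avoid" on an Ingredient Safety avoid vote, else tally both counts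
def pvScanHigh (items : List (String × List (String × String))) (buy avoid : Int) : String :=
  match items with
  | [] => if buy ≥ 2 then "buy" else if avoid ≥ 2 then "avoid" else "neutral"
  | (name, r) :: rest =>
    let rec? := pvGetRec r
    if rec? = some "avoid" then
      if name = "Ingredient Safety" then "avoid"
      else pvScanHigh rest buy (avoid + 1)
    else if rec? = some "buy" then pvScanHigh rest (buy + 1) avoid
    else pvScanHigh rest buy avoid

-- mid-score regime loop: stop at the second avoid vote or an Ingredient Safety avoid
def pvScanMid (items : List (String × List (String × String))) (avoid : Int) : String :=
  match items with
  | [] => "neutral"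
  | (name, r) :: rest =>
    if pvGetRec r = some "avoid" then
      if name = "Ingredient Safety" ∨ avoid = 1 then "avoid"
      else pvScanMid rest (avoid + 1)
    else pvScanMid rest avoid

def determine_recommendation_py_alt (overall_score : Int) (agent_results : List (String × List (String × String))) : String :=
  if overall_score < 40 then "avoid"
  else if overall_score ≥ 70 then pvScanHigh agent_results 0 0
  else pvScanMid agent_results 0

-- ===== PRECONDITION & SPEC =====
-- Pre_ excludes association lists with duplicate agent names, which a Python dict can never
-- contain (on such lists A reads only the first "Ingredient Safety" entry while B may stop at a later one).
def Pre_determine_recommendation_py (overall_score : Int) (agent_results : List (String × List (String × String))) : Prop :=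
  (agent_results.map Prod.fst).Nodup
instance (overall_score : Int) (agent_results : List (String × List (String × String))) : Decidable (Pre_determine_recommendation_py overall_score agent_results) := by unfold Pre_determine_recommendation_py; infer_instance

def pvWitness_determine_recommendation_py : Int × (List (String × List (String × String))) :=
  (80, [("Ingredient Safety", [("recommendation", "buy")]), ("Value", [("recommendation", "buy")])])

def Spec_determine_recommendation_py (overall_score : Int) (agent_results : List (String × List (String × String))) (out : String) : Prop := out = determine_recommendation_py_alt overall_score agent_results
instance (overall_score : Int) (agent_results : List (String × List (String × String))) (out : String) : Decidable (Spec_determine_recommendation_py overall_score agent_results out) := by unfold Spec_determine_recommendation_py; infer_instance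

-- ===== CLAIM (what is proved, stated in full; the proofs are below) =====
def Claim_equal_determine_recommendation_py : Prop := ∀ (overall_score : Int) (agent_results : List (String × List (String × String))), Dom_determine_recommendation_py overall_score agent_results → Pre_determine_recommendation_py overall_score agent_results → Spec_determine_recommendation_py overall_score agent_results (determine_recommendation_py overall_score agent_results)

-- ===== LEMMAS AND PROOFS =====

-- "some entry named Ingredient Safety recommends avoid"
def pvAnyS (l : List (String × List (String × String))) : Bool :=
  l.any (fun nr => nr.1 == "Ingredient Safety" && decide (pvGetRec nr.2 = some "avoid"))

-- A's counting folds, with an arbitrary initial accumulator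
def pvCnt (v : String) (l : List (String × List (String × String))) (a : Int) : Int :=
  (l.map Prod.snd).foldl (fun acc r => if pvGetRec r = some v then acc + 1 else acc) a

lemma pvCnt_cons (v : String) (h : String × List (String × String))
    (t : List (String × List (String × String))) (a : Int) :
    pvCnt v (h :: t) a = pvCnt v t (if pvGetRec h.2 = some v then a + 1 else a) := rfl

lemma pvAnyS_cons (h : String × List (String × String))
    (t : List (String × List (String × String))) :
    pvAnyS (h :: t) =
      ((h.1 == "Ingredient Safety") && decide (pvGetRec h.2 = some "avoid") || pvAnyS t) := rfl

lemma pvCnt_shift (v : String) (l : List (String × List (String × String))) (a : Int) :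
    pvCnt v l a = a + pvCnt v l 0 := by
  induction l generalizing a with
  | nil => simp [pvCnt]
  | cons h t ih =>
    rw [pvCnt_cons, pvCnt_cons]
    by_cases hv : pvGetRec h.2 = some v
    · rw [if_pos hv, if_pos hv, ih (a + 1), ih (0 + 1)]; ring
    · rw [if_neg hv, if_neg hv, ih a]

lemma pvCnt_nonneg (v : String) (l : List (String × List (String × String))) :
    0 ≤ pvCnt v l 0 := by
  induction l with
  | nil => simp [pvCnt]
  | cons h t ih =>
    rw [pvCnt_cons, pvCnt_shift]
    by_cases hv : pvGetRec h.2 = some v <;> simp [hv] <;> omega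

lemma pvScanHigh_spec (l : List (String × List (String × String))) (b a : Int) :
    pvScanHigh l b a =
      if pvAnyS l then "avoid"
      else if pvCnt "buy" l b ≥ 2 then "buy"
      else if pvCnt "avoid" l a ≥ 2 then "avoid"
      else "neutral" := by
  induction l generalizing b a with
  | nil => simp [pvScanHigh, pvAnyS, pvCnt]
  | cons h t ih =>
    obtain ⟨name, r⟩ := h
    rw [pvAnyS_cons, pvCnt_cons, pvCnt_cons]
    simp only [pvScanHigh]
    by_cases hv : pvGetRec r = some "avoid"
    · by_cases hn : name = "Ingredient Safety"
      · simp [hv, hn]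
      · have hb : ¬ pvGetRec r = some "buy" := by simp [hv]
        simp only [if_neg hn, ih, hv, if_pos, if_neg,
          decide_true, Bool.and_true]
        have hn' : (name == "Ingredient Safety") = false := by simp [hn]
        simp [hn', hv, hb]
    · by_cases hbuy : pvGetRec r = some "buy"
      · simp [hv, hbuy, ih]
      · simp [hv, hbuy, ih]

lemma pvScanMid_spec (l : List (String × List (String × String))) (a : Int)
    (ha : a = 0 ∨ a = 1) :
    pvScanMid l a =
      if pvAnyS l then "avoid"
      else if pvCnt "avoid" l a ≥ 2 then "avoid"
      else "neutral" := by
  induction l generalizing a with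
  | nil =>
    rcases ha with h | h <;> simp [pvScanMid, pvAnyS, pvCnt, h]
  | cons h t ih =>
    obtain ⟨name, r⟩ := h
    rw [pvAnyS_cons, pvCnt_cons]
    simp only [pvScanMid]
    by_cases hv : pvGetRec r = some "avoid"
    · by_cases hn : name = "Ingredient Safety"
      · simp [hv, hn]
      · have hn' : (name == "Ingredient Safety") = false := by simp [hn]
        by_cases h1 : a = 1
        · have h2 : pvCnt "avoid" t (a + 1) ≥ 2 := by
            rw [pvCnt_shift]
            have := pvCnt_nonneg "avoid" t
            omega
          rw [if_pos hv, if_pos (Or.inr h1)]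
          simp only [hv, if_pos, hn', decide_true, Bool.and_true, Bool.false_or]
          split <;> simp [h2]
        · have ha0 : a = 0 := by rcases ha with h | h; exact h; exact absurd h h1
          rw [if_pos hv, if_neg (by push_neg; exact ⟨hn, h1⟩), ih (a + 1) (by omega)]
          simp [hn', hv]
    · have hn2 : ¬ (pvGetRec r = some "avoid") := hv
      simp [hv, ih a ha]

-- under distinct agent names, pvAnyS is A's first-match safety check
lemma pvAnyS_eq_find (l : List (String × List (String × String)))
    (h : (l.map Prod.fst).Nodup) :
    pvAnyS l =
      decide (pvGetRec (match l.find? (fun p => p.1 == "Ingredient Safety") with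
        | some p => p.2
        | none => []) = some "avoid") := by
  induction l with
  | nil => simp [pvAnyS, pvGetRec]
  | cons p t ih =>
    simp only [List.map_cons, List.nodup_cons] at h
    rw [pvAnyS_cons]
    by_cases hk : p.1 = "Ingredient Safety"
    · have ht : pvAnyS t = false := by
        rw [pvAnyS, List.any_eq_false]
        intro nr hnr
        have : nr.1 ≠ "Ingredient Safety" := by
          intro he
          exact h.1 (hk ▸ he ▸ List.mem_map_of_mem hnr)
        simp [this]
      have hk' : (p.1 == "Ingredient Safety") = true := by simp [hk]
      rw [ht, hk',
        show List.find? (fun q => q.1 == "Ingredient Safety") (p :: t) = some p from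
          List.find?_cons_of_pos hk']
      simp
    · have hk' : (p.1 == "Ingredient Safety") = false := by simp [hk]
      rw [hk',
        show List.find? (fun q => q.1 == "Ingredient Safety") (p :: t) =
            List.find? (fun q => q.1 == "Ingredient Safety") t from
          List.find?_cons_of_neg (by simp [hk])]
      simp only [Bool.false_and, Bool.false_or]
      exact ih h.2

-- ===== VERDICT (by name: the statement is the Claim_ definition above) =====
theorem determine_recommendation_py_spec : Claim_equal_determine_recommendation_py := by
  intro overall_score agent_results _hdom hpre
  show determine_recommendation_py overall_score agent_results =
    determine_recommendation_py_alt overall_score agent_results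
  unfold determine_recommendation_py determine_recommendation_py_alt
  rw [pvScanHigh_spec, pvScanMid_spec _ 0 (Or.inl rfl), pvAnyS_eq_find agent_results hpre]
  have h1 : List.foldl (fun acc r => if pvGetRec r = some "buy" then acc + 1 else acc) 0
      (agent_results.map Prod.snd) = pvCnt "buy" agent_results 0 := rfl
  have h2 : List.foldl (fun acc r => if pvGetRec r = some "avoid" then acc + 1 else acc) 0
      (agent_results.map Prod.snd) = pvCnt "avoid" agent_results 0 := rfl
  simp only [h1, h2, decide_eq_true_eq]
  split_ifs <;> first | rfl | (exfalso; omega)
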